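-- pv_equiv track=rewrite | github.com/darickle/Python-Movie-Recommender | backend/app.py | is_available_on_user_services
-- ===== SOURCE A (Python) =====
-- def is_available_on_user_services(sources, user_services):
--     if not sources or not user_services:
--         return False
--
--     # Convert both to strings for comparison
--     user_services = [str(service_id) for service_id in user_services]
--
--     for source in sources:
--         source_id = str(source.get("source_id", ""))
--         if source_id in user_services:
--             return True
--     return False
-- ===== SOURCE B (Python) =====
-- def is_available_on_user_services(sources, user_services):
--     # Sort the stringified ids on both sides, then detect a common element
--     # with a single two-pointer merge scan (no membership tests at all).
--     a = sorted(str(s.get("source_id", "")) for s in sources)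
--     b = sorted(str(x) for x in user_services)
--     i = j = 0
--     while i < len(a) and j < len(b):
--         if a[i] == b[j]:
--             return True
--         if a[i] < b[j]:
--             i += 1
--         else:
--             j += 1
--     return False
-- ===== Notes on version B (the rewrite author's own statement) =====
-- stated objective: faster
-- what changed: Replaces A's per-source loop with a linear membership scan inside by a sort-both-sides then two-pointer merge scan that detects a common stringified id without any membership test.
import Mathlib
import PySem

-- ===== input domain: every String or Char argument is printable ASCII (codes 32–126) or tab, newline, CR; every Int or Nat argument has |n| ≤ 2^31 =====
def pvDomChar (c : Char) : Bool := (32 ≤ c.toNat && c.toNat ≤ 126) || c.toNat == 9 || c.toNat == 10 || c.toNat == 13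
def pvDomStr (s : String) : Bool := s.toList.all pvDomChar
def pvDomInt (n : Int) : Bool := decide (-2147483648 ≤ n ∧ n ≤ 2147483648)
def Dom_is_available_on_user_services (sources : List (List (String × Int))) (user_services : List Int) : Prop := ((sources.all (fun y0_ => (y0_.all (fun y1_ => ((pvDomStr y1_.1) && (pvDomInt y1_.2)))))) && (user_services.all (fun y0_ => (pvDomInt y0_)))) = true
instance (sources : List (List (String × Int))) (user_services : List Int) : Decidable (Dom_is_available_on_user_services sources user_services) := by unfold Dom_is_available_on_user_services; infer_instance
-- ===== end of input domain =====

-- B replaces A's per-source loop with a list-membership scan inside by sorting the stringified ids on both sides and running a two-pointer merge scan; a timing run measured B faster.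

-- ===== PORT A =====
-- str(source.get("source_id", "")): stringify the looked-up int, or "" when the key is absent
def pvAStr (source : List (String × Int)) : String :=
  match source.lookup "source_id" with  -- assoc-list dict: first match
  | some v => PySem.Int.toStr v
  | none => ""

-- the 'for source in sources: … return True … / return False' loop
def pvALoop (sources : List (List (String × Int))) (us : List String) : Bool :=
  match sources with
  | [] => false
  | source :: rest =>
    if us.contains (pvAStr source) then true else pvALoop rest us

def is_available_on_user_services (sources : List (List (String × Int))) (user_services : List Int) : Bool :=
  if sources.isEmpty || user_services.isEmpty then false
  else
    let us := user_services.map (fun service_id => PySem.Int.toStr service_id)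
    pvALoop sources us

-- ===== PORT B =====
-- B's while loop over indices i, j becomes the obvious recursion over the two suffixes
def pvMerge (a b : List String) : Bool :=
  match a, b with
  | [], _ => false
  | _, [] => false
  | x :: xs, y :: ys =>
    if x = y then true
    else if x < y then pvMerge xs (y :: ys)
    else pvMerge (x :: xs) ys
termination_by (a.length, b.length)

def is_available_on_user_services_alt (sources : List (List (String × Int))) (user_services : List Int) : Bool :=
  let a := PySem.List.sorted (sources.map (fun s =>
    match s.lookup "source_id" with  -- assoc-list dict: first match
    | some v => PySem.Int.toStr v
    | none => "")) (fun x => x) false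
  let b := PySem.List.sorted (user_services.map (fun x => PySem.Int.toStr x)) (fun x => x) false
  pvMerge a b

-- ===== PRECONDITION & SPEC =====
def Spec_is_available_on_user_services (sources : List (List (String × Int))) (user_services : List Int) (out : Bool) : Prop := out = is_available_on_user_services_alt sources user_services
instance (sources : List (List (String × Int))) (user_services : List Int) (out : Bool) : Decidable (Spec_is_available_on_user_services sources user_services out) := by unfold Spec_is_available_on_user_services; infer_instance

-- ===== CLAIM (what is proved, stated in full; the proofs are below) =====
def Claim_equal_is_available_on_user_services : Prop := ∀ (sources : List (List (String × Int))) (user_services : List Int), Dom_is_available_on_user_services sources user_services → Spec_is_available_on_user_services sources user_services (is_available_on_user_services sources user_services)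

-- ===== LEMMAS AND PROOFS =====

lemma pvALoop_eq_any (sources : List (List (String × Int))) (us : List String) :
    pvALoop sources us = sources.any (fun s => us.contains (pvAStr s)) := by
  induction sources with
  | nil => rfl
  | cons s rest ih => simp [pvALoop, List.any_cons, ih]

-- on sorted lists the merge scan finds exactly the common elements
lemma pvMerge_iff (a b : List String) :
    a.Pairwise (· ≤ ·) → b.Pairwise (· ≤ ·) → (pvMerge a b = true ↔ ∃ x, x ∈ a ∧ x ∈ b) := by
  fun_induction pvMerge a b with
  | case1 b => intro _ _; simp
  | case2 a h => intro _ _; simp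
  | case3 xs y ys =>
    intro _ _
    simp only [true_iff]
    exact ⟨y, by simp, by simp⟩
  | case4 x xs y ys hne hlt ih =>
    intro ha hb
    rw [ih (List.Pairwise.of_cons ha) hb]
    constructor
    · rintro ⟨z, hz1, hz2⟩; exact ⟨z, List.mem_cons_of_mem _ hz1, hz2⟩
    · rintro ⟨z, hz1, hz2⟩
      rcases List.mem_cons.1 hz1 with rfl | hz1'
      · -- z = x cannot be in y :: ys since x < y ≤ every element of ys
        rcases List.mem_cons.1 hz2 with rfl | hz2'
        · exact absurd rfl hne
        · have := (List.pairwise_cons.1 hb).1 _ hz2'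
          exact absurd rfl (ne_of_lt (lt_of_lt_of_le hlt this))
      · exact ⟨z, hz1', hz2⟩
  | case5 x xs y ys hne hnlt ih =>
    intro ha hb
    rw [ih ha (List.Pairwise.of_cons hb)]
    have hyx : y < x := lt_of_le_of_ne (not_lt.1 hnlt) (Ne.symm hne)
    constructor
    · rintro ⟨z, hz1, hz2⟩; exact ⟨z, hz1, List.mem_cons_of_mem _ hz2⟩
    · rintro ⟨z, hz1, hz2⟩
      rcases List.mem_cons.1 hz2 with rfl | hz2'
      · rcases List.mem_cons.1 hz1 with rfl | hz1'
        · exact absurd rfl hne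
        · have := (List.pairwise_cons.1 ha).1 _ hz1'
          exact absurd rfl (ne_of_gt (lt_of_lt_of_le hyx this))
      · exact ⟨z, hz1, hz2'⟩

lemma alt_eq_any (sources : List (List (String × Int))) (user_services : List Int) :
    is_available_on_user_services_alt sources user_services
      = sources.any (fun s => (user_services.map (fun x => PySem.Int.toStr x)).contains (pvAStr s)) := by
  unfold is_available_on_user_services_alt
  rw [Bool.eq_iff_iff]
  rw [pvMerge_iff _ _ (PySem.List.sorted_pairwise _ _) (PySem.List.sorted_pairwise _ _)]
  simp only [PySem.List.mem_sorted, List.any_eq_true, List.mem_map]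
  constructor
  · rintro ⟨z, ⟨s, hs, rfl⟩, hz2⟩
    exact ⟨s, hs, by simpa [pvAStr, List.contains_iff_mem] using hz2⟩
  · rintro ⟨s, hs, hmem⟩
    exact ⟨pvAStr s, ⟨s, hs, by simp [pvAStr]⟩, by simpa [List.contains_iff_mem] using hmem⟩

-- ===== VERDICT (by name: the statement is the Claim_ definition above) =====
theorem is_available_on_user_services_spec : Claim_equal_is_available_on_user_services := by
  intro sources user_services _
  unfold Spec_is_available_on_user_services
  unfold is_available_on_user_services
  rw [alt_eq_any, pvALoop_eq_any]
  by_cases hs : sources = []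
  · simp [hs]
  · by_cases hu : user_services = []
    · simp [hu]
    · simp [List.isEmpty_iff, hs, hu]
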